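-- pv_equiv track=rewrite | github.com/daniel-reich/ubiquitous-fiesta | 8gE6FCdnWbECiR7ze_20.py | smith_type
-- ===== SOURCE A (Python) =====
-- def smith_type(number):
--   if prime(number):
--     return "Trivial Smith"
--   dr1 = digital_root(number)
--   spf = sum(prime_factors(number))
--   dr2 = digital_root(spf)
--   if dr1 == dr2:
--     if digital_root(number-1) == digital_root(sum([int(i) for i in prime_factors(number-1)])):
--       return "Oldest Smith"
--     elif digital_root(number+1) == digital_root(sum([int(i) for i in prime_factors(number+1)])):
--       return "Youngest Smith"
--     else:
--       return "Single Smith"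
--   return "Not a Smith"
--
-- def prime(n):
--   for i in range(2,n):
--     if n%i == 0:
--       return False
--   return n!=1
--
-- def prime_factors(n):
--   lst = []
--   for i in range(2,n//2+1):
--     if prime(i) and n%i == 0:
--       while n%i == 0:
--         lst.append(i)
--         n = n // i
--   return lst
--
-- def digital_root(n):
--   if n < 10:
--     return n
--   return digital_root(sum([int(i) for i in str(n)]))
-- ===== SOURCE B (Python) =====
-- # B: same classification, but primality by trial division up to sqrt(n) and a
-- # single factor-sum accumulation loop (no factor list, no per-candidate primality
-- # test), with a closed-form digital root; O(sqrt(n)) instead of A's O(n^2).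
--
-- def smith_type(number):
--   if _prime(number):
--     return "Trivial Smith"
--   if not _is_smith(number):
--     return "Not a Smith"
--   if _is_smith(number - 1):
--     return "Oldest Smith"
--   if _is_smith(number + 1):
--     return "Youngest Smith"
--   return "Single Smith"
--
-- def _prime(n):
--   # same predicate as A's prime(): n != 1 and no divisor in 2..n-1,
--   # decided by testing divisors only up to sqrt(n)
--   if n < 2:
--     return n != 1
--   d = 2
--   while d * d <= n:
--     if n % d == 0:
--       return False
--     d += 1
--   return True
--
-- def _factor_sum(n):
--   # sum of the prime factorization of n (with multiplicity), one loop
--   s = 0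
--   d = 2
--   while d * d <= n:
--     if n % d == 0:
--       s += d
--       n //= d
--     else:
--       d += 1
--   return s + (n if n > 1 else 0)
--
-- def _digital_root(n):
--   return n if n < 10 else 1 + (n - 1) % 9
--
-- def _is_smith(n):
--   return not _prime(n) and _digital_root(n) == _digital_root(_factor_sum(n))
-- ===== Notes on version B (the rewrite author's own statement) =====
-- stated objective: faster
-- what changed: Primality is decided by trial division up to sqrt(n) instead of scanning all of 2..n-1, the factor list (which A rebuilds with a quadratic per-candidate primality scan up to n/2) is replaced by one sqrt-bounded divide-out loop that accumulates the factor sum directly, and the digital root is the closed form 1+(n-1)%9.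
import Mathlib
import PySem

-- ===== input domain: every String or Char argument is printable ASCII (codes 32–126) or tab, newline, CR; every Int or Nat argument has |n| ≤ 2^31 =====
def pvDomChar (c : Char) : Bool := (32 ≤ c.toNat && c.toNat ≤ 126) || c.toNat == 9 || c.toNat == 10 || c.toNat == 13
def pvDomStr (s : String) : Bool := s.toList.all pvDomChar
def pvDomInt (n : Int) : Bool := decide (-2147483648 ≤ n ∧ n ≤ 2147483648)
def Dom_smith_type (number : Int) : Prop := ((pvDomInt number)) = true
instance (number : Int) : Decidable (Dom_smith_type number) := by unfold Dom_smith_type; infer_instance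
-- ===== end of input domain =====

-- B replaces A's O(n^2) full-range trial loops by sqrt-bounded trial division,
-- a single factor-sum loop and a closed-form digital root (faster, asymptotic).


-- ===== PORT A =====
-- prime(n): 'for i in range(2,n): if n%i==0: return False' then 'return n != 1'
def prime (n : Int) : Bool :=
  if (PySem.List.pyRange 2 n 1).any (fun i => PySem.Int.mod n i == 0) then false
  else !(n == 1)

-- inner 'while n%i==0: lst.append(i); n = n//i' of prime_factors, fueled;
-- fuel n.toNat is enough since each pass divides n (≥ 1 here) by i ≥ 2
def divOut : Nat → List Int → Int → Int → List Int × Int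
  | 0, lst, n, _ => (lst, n)
  | f+1, lst, n, i =>
    if PySem.Int.mod n i == 0 then divOut f (lst ++ [i]) (PySem.Int.floordiv n i) i
    else (lst, n)

def prime_factors (n : Int) : List Int :=
  ((PySem.List.pyRange 2 (PySem.Int.floordiv n 2 + 1) 1).foldl
    (fun (st : List Int × Int) i =>
      if prime i && (PySem.Int.mod st.2 i == 0) then divOut st.2.toNat st.1 st.2 i else st)
    ([], n)).1

-- sum([int(i) for i in str(n)]); int of a one-character string via ofChars?
-- (always a digit when this is reached, so the .getD 0 default is never used)
def digitSumStr (n : Int) : Int :=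
  ((PySem.Int.toChars n).map (fun c => (PySem.Int.ofChars? [c]).getD 0)).sum

-- digital_root(n), fueled structural recursion; the digit sum strictly
-- decreases any n ≥ 10, so fuel n.toNat + 1 covers the recursion depth
def digitalRootF : Nat → Int → Int
  | 0, n => n
  | f+1, n => if n < 10 then n else digitalRootF f (digitSumStr n)

def digital_root (n : Int) : Int := digitalRootF (n.toNat + 1) n

def smith_type (number : Int) : String :=
  if prime number then "Trivial Smith"
  else
    let dr1 := digital_root number
    let spf := (prime_factors number).sum
    let dr2 := digital_root spf
    if dr1 == dr2 then
      if digital_root (number - 1) ==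
          digital_root (((prime_factors (number - 1)).map (fun i => i)).sum) then "Oldest Smith"
      else if digital_root (number + 1) ==
          digital_root (((prime_factors (number + 1)).map (fun i => i)).sum) then "Youngest Smith"
      else "Single Smith"
    else "Not a Smith"

-- ===== PORT B =====
-- 'while d*d <= n: if n%d==0: return False; d += 1', fueled (≤ n.toNat steps)
def primeLoopAlt : Nat → Int → Int → Bool
  | 0, _, _ => true
  | f+1, n, d =>
    if d * d ≤ n then (if PySem.Int.mod n d == 0 then false else primeLoopAlt f n (d+1))
    else true

def prime_alt (n : Int) : Bool :=
  if n < 2 then !(n == 1) else primeLoopAlt n.toNat n 2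

-- _factor_sum's single loop: divide out d or advance d, fueled (≤ 2*n.toNat+2 steps)
def factorLoopAlt : Nat → Int → Int → Int → Int × Int
  | 0, s, n, _ => (s, n)
  | f+1, s, n, d =>
    if d * d ≤ n then
      (if PySem.Int.mod n d == 0 then factorLoopAlt f (s + d) (PySem.Int.floordiv n d) d
       else factorLoopAlt f s n (d+1))
    else (s, n)

def factor_sum_alt (n : Int) : Int :=
  let sr := factorLoopAlt (2 * n.toNat + 2) 0 n 2
  sr.1 + (if sr.2 > 1 then sr.2 else 0)

def digital_root_alt (n : Int) : Int := if n < 10 then n else 1 + PySem.Int.mod (n - 1) 9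

def is_smith_alt (n : Int) : Bool :=
  !(prime_alt n) && (digital_root_alt n == digital_root_alt (factor_sum_alt n))

def smith_type_alt (number : Int) : String :=
  if prime_alt number then "Trivial Smith"
  else if !(is_smith_alt number) then "Not a Smith"
  else if is_smith_alt (number - 1) then "Oldest Smith"
  else if is_smith_alt (number + 1) then "Youngest Smith"
  else "Single Smith"

-- ===== PRECONDITION & SPEC =====
def Spec_smith_type (number : Int) (out : String) : Prop := out = smith_type_alt number
instance (number : Int) (out : String) : Decidable (Spec_smith_type number out) := by unfold Spec_smith_type; infer_instance

-- ===== CLAIM (what is proved, stated in full; the proofs are below) =====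
def Claim_equal_smith_type : Prop := ∀ (number : Int), Dom_smith_type number → Spec_smith_type number (smith_type number)

-- ===== LEMMAS AND PROOFS =====

theorem primeA_lt_two (n : Int) (hn : n < 2) : prime n = !(n == 1) := by
  unfold prime
  rw [PySem.List.pyRange_one_eq_nil (by omega)]
  simp

theorem primeA_iff (n : Int) (hn : 2 ≤ n) :
    prime n = true ↔ ∀ i : Int, 2 ≤ i → i < n → ¬ i ∣ n := by
  unfold prime
  constructor
  · intro h i h2 hi hdvd
    split at h
    · exact absurd h (by simp)
    · rename_i hany
      exact hany (by
        simp only [List.any_eq_true]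
        exact ⟨i, PySem.List.mem_pyRange_one.2 ⟨h2, hi⟩, by
          simp [(PySem.Int.mod_eq_zero_iff_dvd n i).2 hdvd]⟩)
  · intro h
    split
    · rename_i hany
      simp only [List.any_eq_true] at hany
      obtain ⟨i, hmem, hmod⟩ := hany
      obtain ⟨h2, hi⟩ := PySem.List.mem_pyRange_one.1 hmem
      simp only [beq_iff_eq] at hmod
      exact absurd ((PySem.Int.mod_eq_zero_iff_dvd n i).1 hmod) (h i h2 hi)
    · simp; omega

theorem primeLoopAlt_iff (f : Nat) (n d : Int) (hn : 2 ≤ n) (hd : 2 ≤ d)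
    (hf : (n + 1 - d).toNat ≤ f) :
    primeLoopAlt f n d = true ↔ ∀ e : Int, d ≤ e → e * e ≤ n → ¬ e ∣ n := by
  induction f generalizing d with
  | zero =>
    simp only [primeLoopAlt, true_iff]
    intro e hde hee _
    have hd' : d ≥ n + 1 := by omega
    nlinarith
  | succ f ih =>
    simp only [primeLoopAlt]
    by_cases hdd : d * d ≤ n
    · rw [if_pos hdd]
      have hdn : d ≤ n := by nlinarith
      by_cases hm : PySem.Int.mod n d = 0
      · simp only [hm, beq_self_eq_true, if_pos]
        constructor
        · intro h; exact absurd h (by simp)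
        · intro h
          exact absurd ((PySem.Int.mod_eq_zero_iff_dvd n d).1 hm) (h d le_rfl hdd)
      · rw [if_neg (by simpa using hm)]
        rw [ih (d+1) (by omega) (by omega)]
        constructor
        · intro h e hde hee hdvd
          rcases eq_or_lt_of_le hde with heq | hlt
          · subst heq; exact hm ((PySem.Int.mod_eq_zero_iff_dvd n d).2 hdvd)
          · exact h e (by omega) hee hdvd
        · intro h e hde hee hdvd
          exact h e (by omega) hee hdvd
    · rw [if_neg hdd]
      simp only [true_iff]
      intro e hde hee _
      have : d * d ≤ e * e := mul_le_mul hde hde (by omega) (by omega)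
      omega

theorem sqrt_divisor_equiv (n : Int) (hn : 2 ≤ n) :
    (∀ i : Int, 2 ≤ i → i < n → ¬ i ∣ n) ↔ (∀ e : Int, 2 ≤ e → e * e ≤ n → ¬ e ∣ n) := by
  constructor
  · intro h e h2 hee hdvd
    have : 2 * e ≤ e * e := by nlinarith
    exact h e h2 (by omega) hdvd
  · intro h i h2 hi hdvd
    obtain ⟨k, hk⟩ := hdvd
    have hk2 : 2 ≤ k := by
      by_contra hc
      rcases le_or_gt k 0 with h0 | h1
      · nlinarith
      · have hk1 : k = 1 := by omega
        subst hk1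
        simp at hk
        omega
    rcases le_or_gt i k with hik | hki
    · exact h i h2 (by nlinarith) ⟨k, hk⟩
    · exact h k hk2 (by nlinarith) ⟨i, by linarith [hk]⟩

theorem prime_eq (n : Int) : prime_alt n = prime n := by
  by_cases hn : n < 2
  · rw [primeA_lt_two n hn]; unfold prime_alt; rw [if_pos hn]
  · simp only [not_lt] at hn
    unfold prime_alt
    rw [if_neg (by omega)]
    rw [Bool.eq_iff_iff]
    rw [primeLoopAlt_iff n.toNat n 2 hn (by omega) (by omega)]
    rw [primeA_iff n hn]
    exact ((sqrt_divisor_equiv n hn).trans (by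
      constructor
      · intro h e hde hee; exact h e hde hee
      · intro h e hde hee; exact h e hde hee)).symm

theorem primeA_nat (n : Int) (hn : 2 ≤ n) : prime n = true ↔ Nat.Prime n.toNat := by
  rw [primeA_iff n hn, Nat.prime_def_lt]
  constructor
  · intro h
    refine ⟨by omega, ?_⟩
    intro k hk hdvd
    by_contra hk1
    have hk2 : 2 ≤ k := by
      rcases Nat.eq_zero_or_pos k with rfl | hp
      · obtain ⟨c, hc⟩ := hdvd; omega
      · omega
    have : (k : Int) ∣ n := by
      have := Int.natCast_dvd_natCast.2 hdvd
      rwa [Int.toNat_of_nonneg (by omega)] at this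
    exact h k (by exact_mod_cast hk2) (by omega) this
  · intro hp i h2 hi hdvd
    have hdvd' : i.toNat ∣ n.toNat := by
      rw [← Int.natCast_dvd_natCast, Int.toNat_of_nonneg (by omega), Int.toNat_of_nonneg (by omega)]
      exact hdvd
    have := hp.2 i.toNat (by omega) hdvd'
    omega

theorem toDigitsCore_eq (f n : Nat) (ds : List Char) (h0 : n ≠ 0) (hf : n < f) :
    Nat.toDigitsCore 10 f n ds = ((Nat.digits 10 n).map Nat.digitChar).reverse ++ ds := by
  induction f generalizing n ds with
  | zero => omega
  | succ f ih =>
    rw [Nat.digits_def' (b := 10) (by norm_num) (Nat.pos_of_ne_zero h0)]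
    simp only [Nat.toDigitsCore]
    by_cases hq : n / 10 = 0
    · rw [if_pos hq, hq, Nat.digits_zero]
      simp
    · rw [if_neg hq, ih (n / 10) (Nat.digitChar (n % 10) :: ds) hq (by omega)]
      simp

theorem ofChars?_digitChar (d : Nat) (hd : d < 10) :
    PySem.Int.ofChars? [Nat.digitChar d] = some (d : Int) := by
  interval_cases d <;> decide

theorem digitSumStr_eq (n : Int) (h : 0 ≤ n) :
    digitSumStr n = ((Nat.digits 10 n.toNat).sum : Int) := by
  unfold digitSumStr
  unfold PySem.Int.toChars
  rw [if_neg (by omega)]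
  by_cases h0 : n.toNat = 0
  · rw [h0]
    simp [Nat.toDigits, Nat.toDigitsCore]
    decide
  · rw [Nat.toDigits, toDigitsCore_eq (n.toNat + 1) n.toNat [] h0 (by omega)]
    rw [List.append_nil, List.map_reverse, List.sum_reverse, List.map_map]
    rw [List.map_congr_left (f := (fun c => (PySem.Int.ofChars? [c]).getD 0) ∘ Nat.digitChar)
      (g := fun d => (d : Int)) (fun d hd => by
        simp only [Function.comp_apply]
        rw [ofChars?_digitChar d (Nat.digits_lt_base (by norm_num) hd)]
        rfl)]
    simp [Nat.cast_list_sum]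

theorem sum_digits_le (m : Nat) : (Nat.digits 10 m).sum ≤ m := by
  induction m using Nat.strong_induction_on with
  | _ m ih =>
    by_cases h0 : m = 0
    · subst h0; simp
    · rw [Nat.digits_def' (b := 10) (by norm_num) (Nat.pos_of_ne_zero h0)]
      have := ih (m / 10) (by omega)
      simp only [List.sum_cons]
      omega

theorem sum_digits_lt (m : Nat) (hm : 10 ≤ m) : (Nat.digits 10 m).sum < m := by
  rw [Nat.digits_def' (b := 10) (by norm_num) (by omega)]
  have := sum_digits_le (m / 10)
  simp only [List.sum_cons]
  omega

theorem sum_digits_pos (m : Nat) (hm : 0 < m) : 0 < (Nat.digits 10 m).sum := by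
  induction m using Nat.strong_induction_on with
  | _ m ih =>
    rw [Nat.digits_def' (b := 10) (by norm_num) hm]
    by_cases hq : m / 10 = 0
    · simp only [List.sum_cons, hq, Nat.digits_zero]
      simp
      omega
    · have := ih (m / 10) (by omega) (by omega)
      simp only [List.sum_cons]
      omega

theorem dralt_eq (a : Int) (h : 1 ≤ a) : digital_root_alt a = 1 + PySem.Int.mod (a - 1) 9 := by
  unfold digital_root_alt
  split
  · rw [PySem.Int.mod_eq_emod_of_pos (by norm_num)]
    omega
  · rfl

theorem drF_closed (f : Nat) (n : Int) (h : 0 ≤ n) (hf : n.toNat < f) :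
    digitalRootF f n = digital_root_alt n := by
  induction f generalizing n with
  | zero => omega
  | succ f ih =>
    simp only [digitalRootF]
    by_cases hn : n < 10
    · rw [if_pos hn]; unfold digital_root_alt; rw [if_pos hn]
    · rw [if_neg hn]
      have hds := digitSumStr_eq n h
      set s := (Nat.digits 10 n.toNat).sum with hs
      have hslt : s < n.toNat := sum_digits_lt n.toNat (by omega)
      have hspos : 0 < s := sum_digits_pos n.toNat (by omega)
      rw [hds, ih (s : Int) (by positivity) (by omega)]
      rw [dralt_eq _ (by exact_mod_cast hspos), dralt_eq n (by omega)]
      have hmod : s % 9 = n.toNat % 9 := (Nat.modEq_nine_digits_sum n.toNat).symm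
      have hmodi : (s : Int) % 9 = n % 9 := by omega
      rw [PySem.Int.mod_eq_emod_of_pos (by norm_num), PySem.Int.mod_eq_emod_of_pos (by norm_num)]
      omega

theorem dralt_pos (n : Int) (h : 1 ≤ n) : 1 ≤ digital_root_alt n := by
  unfold digital_root_alt
  split
  · omega
  · have := PySem.Int.mod_nonneg (n - 1) (b := 9) (by norm_num)
    omega

theorem dr_closed (n : Int) (h : 0 ≤ n) : digital_root n = digital_root_alt n := by
  exact drF_closed (n.toNat + 1) n h (by omega)

-- ---- small list-cast helpers ----
theorem list_sum_toNat (L : List Int) (h : ∀ p ∈ L, 0 ≤ p) :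
    ((L.map Int.toNat).sum : Int) = L.sum := by
  induction L with
  | nil => simp
  | cons p t ih =>
    simp only [List.map_cons, List.sum_cons, Nat.cast_add]
    rw [ih (fun q hq => h q (List.mem_cons_of_mem p hq)), Int.toNat_of_nonneg (h p List.mem_cons_self)]

theorem list_prod_toNat (L : List Int) (h : ∀ p ∈ L, 0 ≤ p) :
    ((L.map Int.toNat).prod : Int) = L.prod := by
  induction L with
  | nil => simp
  | cons p t ih =>
    simp only [List.map_cons, List.prod_cons, Nat.cast_mul]
    rw [ih (fun q hq => h q (List.mem_cons_of_mem p hq)), Int.toNat_of_nonneg (h p List.mem_cons_self)]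

-- ---- A's inner while loop ----
theorem divOut_spec (f : Nat) (lst : List Int) (n i : Int) (hi : 2 ≤ i) (hn : 1 ≤ n)
    (hf : n.toNat ≤ f) :
    ∃ (e : Nat) (r : Int), divOut f lst n i = (lst ++ List.replicate e i, r) ∧
      1 ≤ r ∧ n = i ^ e * r ∧ ¬ i ∣ r := by
  induction f generalizing lst n with
  | zero => omega
  | succ f ih =>
    simp only [divOut]
    by_cases hm : PySem.Int.mod n i = 0
    · rw [if_pos (by simpa using hm)]
      have hdvd : i ∣ n := (PySem.Int.mod_eq_zero_iff_dvd n i).1 hm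
      have hfd : PySem.Int.floordiv n i = n / i := PySem.Int.floordiv_eq_ediv_of_pos (by omega)
      obtain ⟨k, hk⟩ := hdvd
      have hkval : n / i = k := by rw [hk]; exact Int.mul_ediv_cancel_left k (by omega)
      have hk1 : 1 ≤ k := by nlinarith
      have hkn : k < n := by nlinarith
      rw [hfd, hkval]
      obtain ⟨e, r, heq, hr, hre, hnd⟩ := ih (lst ++ [i]) k hk1 (by omega)
      exact ⟨e + 1, r, by rw [heq]; simp [List.replicate_succ], hr,
        by rw [hk, hre]; ring, hnd⟩
    · rw [if_neg (by simpa using hm)]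
      exact ⟨0, n, by simp, hn, by ring,
        fun hdvd => hm ((PySem.Int.mod_eq_zero_iff_dvd n i).2 hdvd)⟩

-- ---- A's outer loop invariant ----
theorem loopA_inv (n : Int) (hn : 2 ≤ n) (j : Nat) :
    ∃ lst r, (PySem.List.pyRange 2 (2 + (j : Int)) 1).foldl
        (fun (st : List Int × Int) i =>
          if prime i && (PySem.Int.mod st.2 i == 0) then divOut st.2.toNat st.1 st.2 i else st)
        ([], n) = (lst, r) ∧ 1 ≤ r ∧
      (∀ p ∈ lst, 2 ≤ p ∧ p < 2 + (j : Int) ∧ prime p = true) ∧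
      lst.prod * r = n ∧
      (∀ q : Int, 2 ≤ q → q < 2 + (j : Int) → ¬ q ∣ r) := by
  induction j with
  | zero =>
    refine ⟨[], n, ?_, by omega, by simp, by simp, by intro q h1 h2 _; simp at h2; omega⟩
    rw [PySem.List.pyRange_one_eq_nil (by norm_num)]
    rfl
  | succ j ih =>
    obtain ⟨lst, r, heq, hr, hmem, hprod, hnod⟩ := ih
    have hcast : (2 + ((j+1 : Nat) : Int)) = (2 + (j : Int)) + 1 := by push_cast; ring
    rw [hcast, PySem.List.pyRange_one_succ_right (by omega), List.foldl_append, heq]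
    set i : Int := 2 + (j : Int) with hi
    simp only [List.foldl_cons, List.foldl_nil]
    by_cases hc : prime i = true ∧ PySem.Int.mod r i = 0
    · rw [if_pos (by simp [hc.1, hc.2])]
      obtain ⟨e, r', heq2, hr', hre, hndvd⟩ :=
        divOut_spec r.toNat lst r i (by omega) hr le_rfl
      have hr'dvd : r' ∣ r := ⟨i ^ e, by rw [hre]; ring⟩
      refine ⟨lst ++ List.replicate e i, r', heq2, hr', ?_, ?_, ?_⟩
      · intro p hp
        rcases List.mem_append.1 hp with h | h
        · obtain ⟨a, b, c⟩ := hmem p h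
          exact ⟨a, by omega, c⟩
        · rw [List.eq_of_mem_replicate h]
          exact ⟨by omega, by omega, hc.1⟩
      · rw [List.prod_append, List.prod_replicate, ← hprod, hre]; ring
      · intro q h2 hq hdvd
        rcases lt_or_ge q i with hlt | hge
        · exact hnod q h2 hlt (hdvd.trans hr'dvd)
        · have : q = i := by omega
          subst this
          exact hndvd hdvd
    · rw [if_neg (by
        simp only [Bool.and_eq_true, beq_iff_eq]
        intro hand
        exact hc ⟨hand.1, hand.2⟩)]
      refine ⟨lst, r, rfl, hr, ?_, hprod, ?_⟩
      · intro p hp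
        obtain ⟨a, b, c⟩ := hmem p hp
        exact ⟨a, by omega, c⟩
      · intro q h2 hq hdvd
        rcases lt_or_ge q i with hlt | hge
        · exact hnod q h2 hlt hdvd
        · have hqi : q = i := by omega
          subst hqi
          have hm0 : PySem.Int.mod r i = 0 := (PySem.Int.mod_eq_zero_iff_dvd r i).2 hdvd
          have hnp : ¬ (prime i = true) := fun hpi => hc ⟨hpi, hm0⟩
          have := (not_iff_not.2 (primeA_iff i h2)).1 hnp
          push_neg at this
          obtain ⟨u, hu2, hui, hudvd⟩ := this
          exact hnod u hu2 hui (hudvd.trans hdvd)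

-- ---- A's loop: final-state facts ----
theorem loopA_final (n : Int) (hn : 2 ≤ n) :
    ∃ lst r, prime_factors n = lst ∧
      (((PySem.List.pyRange 2 (PySem.Int.floordiv n 2 + 1) 1).foldl
        (fun (st : List Int × Int) i =>
          if prime i && (PySem.Int.mod st.2 i == 0) then divOut st.2.toNat st.1 st.2 i else st)
        ([], n)) = (lst, r)) ∧ 1 ≤ r ∧
      (∀ p ∈ lst, 2 ≤ p ∧ p < PySem.Int.floordiv n 2 + 1 ∧ prime p = true) ∧
      lst.prod * r = n ∧
      (∀ q : Int, 2 ≤ q → q < PySem.Int.floordiv n 2 + 1 → ¬ q ∣ r) := by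
  have hfd : PySem.Int.floordiv n 2 = n / 2 := PySem.Int.floordiv_eq_ediv_of_pos (by norm_num)
  have hk2 : 2 ≤ PySem.Int.floordiv n 2 + 1 := by rw [hfd]; omega
  obtain ⟨lst, r, heq, hr, hmem, hprod, hnod⟩ :=
    loopA_inv n hn ((PySem.Int.floordiv n 2 + 1) - 2).toNat
  have hcast : (2 + (((PySem.Int.floordiv n 2 + 1) - 2).toNat : Int)) = PySem.Int.floordiv n 2 + 1 := by
    omega
  rw [hcast] at heq hmem hnod
  exact ⟨lst, r, by unfold prime_factors; rw [heq], heq, hr, hmem, hprod, hnod⟩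

theorem A_factors_prime (n : Int) (hn : 2 ≤ n) (hp : prime n = true) :
    prime_factors n = [] := by
  obtain ⟨lst, r, hpf, _, hr, hmem, hprod, hnod⟩ := loopA_final n hn
  rw [hpf]
  rw [List.eq_nil_iff_forall_not_mem]
  intro p hp_mem
  obtain ⟨h2, hlt, _⟩ := hmem p hp_mem
  have hfd : PySem.Int.floordiv n 2 = n / 2 := PySem.Int.floordiv_eq_ediv_of_pos (by norm_num)
  have hdvd : p ∣ n := (List.dvd_prod hp_mem).trans ⟨r, hprod.symm⟩
  exact (primeA_iff n hn).1 hp p h2 (by omega) hdvd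

theorem A_sum_eq (n : Int) (hn : 2 ≤ n) (hp : prime n = false) :
    (prime_factors n).sum = ((n.toNat.primeFactorsList).sum : Int) := by
  obtain ⟨lst, r, hpf, _, hr, hmem, hprod, hnod⟩ := loopA_final n hn
  have hfd : PySem.Int.floordiv n 2 = n / 2 := PySem.Int.floordiv_eq_ediv_of_pos (by norm_num)
  -- r = 1
  have hr1 : r = 1 := by
    by_contra hne
    have hr2 : 2 ≤ r := by omega
    have hrdvd : r ∣ n := ⟨lst.prod, by rw [← hprod]; ring⟩
    rcases le_or_gt r (n / 2) with hle | hgt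
    · exact hnod r hr2 (by omega) dvd_rfl
    · -- r > n/2 and r ∣ n forces r = n
      obtain ⟨c, hc⟩ := hrdvd
      have hc1 : c = 1 := by
        by_contra hne2
        have hc0 : 1 ≤ c := by
          by_contra hcc
          have hcc' : c ≤ 0 := by omega
          have hrc : r * c ≤ 0 := mul_nonpos_of_nonneg_of_nonpos (by omega) hcc'
          linarith [hc]
        have hc2 : 2 ≤ c := by omega
        have h2r : 2 * r ≤ n := by nlinarith
        omega
      have hrn : r = n := by rw [hc1, mul_one] at hc; omega
      -- n not prime gives a divisor i ∈ [2, n); then n/i ∈ [2, n/2] divides n = r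
      have := (not_iff_not.2 (primeA_iff n hn)).1 (by simp [hp])
      push_neg at this
      obtain ⟨i, hi2, hin, hidvd⟩ := this
      obtain ⟨w, hw⟩ := hidvd
      have hw1 : 1 ≤ w := by
        by_contra hcc
        have hcc' : w ≤ 0 := by omega
        have hiw : i * w ≤ 0 := mul_nonpos_of_nonneg_of_nonpos (by omega) hcc'
        linarith [hw]
      have hw2 : 2 ≤ w := by
        rcases eq_or_lt_of_le hw1 with h1 | h2
        · exfalso; rw [← h1, mul_one] at hw; omega
        · omega
      have h2w : 2 * w ≤ n := by nlinarith
      have hwn : w ≤ n / 2 := by omega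
      exact hnod w hw2 (by omega) (by rw [hrn]; exact ⟨i, by rw [hw]; ring⟩)
  rw [hr1, mul_one] at hprod
  have hnn : ∀ p ∈ lst, 0 ≤ p := fun p hp => by have := (hmem p hp).1; omega
  have hperm : (lst.map Int.toNat).Perm n.toNat.primeFactorsList := by
    apply Nat.primeFactorsList_unique
    · have := list_prod_toNat lst hnn
      rw [hprod] at this
      omega
    · intro q hq
      obtain ⟨p, hpmem, hpq⟩ := List.mem_map.1 hq
      obtain ⟨h2, _, hpp⟩ := hmem p hpmem
      rw [← hpq]
      exact (primeA_nat p h2).1 hpp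
  rw [hpf, ← list_sum_toNat lst hnn, hperm.sum_eq]

-- ---- B's loop ----
theorem factorLoopAlt_spec (f : Nat) (s n d : Int) (hd : 2 ≤ d) (hn : 1 ≤ n)
    (hnod : ∀ q : Int, 2 ≤ q → q < d → ¬ q ∣ n)
    (hf : n.toNat + (n.toNat + 1 - d.toNat) ≤ f) :
    ∃ (L : List Int) (r : Int), factorLoopAlt f s n d = (s + L.sum, r) ∧
      (∀ p ∈ L, 2 ≤ p ∧ Nat.Prime p.toNat) ∧ L.prod * r = n ∧ 1 ≤ r ∧
      (r = 1 ∨ Nat.Prime r.toNat) := by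
  induction f generalizing s n d with
  | zero => omega
  | succ f ih =>
    simp only [factorLoopAlt]
    by_cases hdd : d * d ≤ n
    · rw [if_pos hdd]
      have hdn : d ≤ n := by nlinarith
      by_cases hm : PySem.Int.mod n d = 0
      · rw [if_pos (by simpa using hm)]
        have hdvd : d ∣ n := (PySem.Int.mod_eq_zero_iff_dvd n d).1 hm
        have hfd : PySem.Int.floordiv n d = n / d := PySem.Int.floordiv_eq_ediv_of_pos (by omega)
        obtain ⟨k, hk⟩ := hdvd
        have hkval : n / d = k := by rw [hk]; exact Int.mul_ediv_cancel_left k (by omega)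
        have hk1 : 1 ≤ k := by nlinarith
        have hkn : k < n := by nlinarith
        rw [hfd, hkval]
        have hkdvd : k ∣ n := ⟨d, by rw [hk]; ring⟩
        have hdprime : Nat.Prime d.toNat := by
          apply (primeA_nat d hd).1
          apply (primeA_iff d hd).2
          intro j hj2 hjd hjdvd
          exact hnod j hj2 hjd (hjdvd.trans ⟨k, hk⟩)
        obtain ⟨L, r, heq, hLmem, hLprod, hr, hrp⟩ := ih (s + d) k d hd hk1
          (fun q h2 hq hdvdk => hnod q h2 hq (hdvdk.trans hkdvd)) (by omega)
        refine ⟨d :: L, r, ?_, ?_, ?_, hr, hrp⟩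
        · rw [heq]; simp; ring_nf
        · intro p hp
          rcases List.mem_cons.1 hp with h | h
          · subst h; exact ⟨hd, hdprime⟩
          · exact hLmem p h
        · simp only [List.prod_cons]
          rw [mul_assoc, hLprod, hk]
      · rw [if_neg (by simpa using hm)]
        apply ih s n (d + 1) (by omega) hn
        · intro q h2 hq hdvd
          rcases lt_or_ge q d with hlt | hge
          · exact hnod q h2 hlt hdvd
          · have : q = d := by omega
            subst this
            exact hm ((PySem.Int.mod_eq_zero_iff_dvd n q).2 hdvd)
        · omega
    · rw [if_neg hdd]
      refine ⟨[], n, by simp, by simp, by simp, hn, ?_⟩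
      rcases eq_or_lt_of_le hn with h1 | h2
      · left; omega
      · right
        by_contra hnp
        have hne1 : n.toNat ≠ 1 := by omega
        have hpp := Nat.minFac_prime hne1
        have hpdvd := Nat.minFac_dvd n.toNat
        have hsq := Nat.minFac_sq_le_self (by omega) hnp
        set p : Nat := n.toNat.minFac with hpdef
        have hp2 : 2 ≤ p := hpp.two_le
        have hpi : ((p : Int)) ∣ n := by
          have : (p : Int) ∣ (n.toNat : Int) := Int.natCast_dvd_natCast.2 hpdvd
          rwa [Int.toNat_of_nonneg (by omega)] at this
        have hsqi : (p : Int) * (p : Int) ≤ n := by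
          have : ((p * p : Nat) : Int) ≤ ((n.toNat : Nat) : Int) := by
            exact_mod_cast by nlinarith [hsq]
          push_cast at this
          omega
        have hpd : (p : Int) < d := by nlinarith
        exact hnod (p : Int) (by exact_mod_cast hp2) hpd hpi

theorem B_sum_eq (n : Int) (hn : 2 ≤ n) :
    factor_sum_alt n = ((n.toNat.primeFactorsList).sum : Int) := by
  obtain ⟨L, r, heq, hLmem, hLprod, hr, hrp⟩ :=
    factorLoopAlt_spec (2 * n.toNat + 2) 0 n 2 le_rfl (by omega)
      (fun q h2 hq _ => by omega) (by omega)
  unfold factor_sum_alt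
  rw [heq]
  have hLnn : ∀ p ∈ L, 0 ≤ p := fun p hp => by have := (hLmem p hp).1; omega
  rcases hrp with hr1 | hrprime
  · subst hr1
    rw [mul_one] at hLprod
    simp only [zero_add]
    rw [if_neg (by omega)]
    have hperm : (L.map Int.toNat).Perm n.toNat.primeFactorsList := by
      apply Nat.primeFactorsList_unique
      · have := list_prod_toNat L hLnn
        rw [hLprod] at this
        omega
      · intro q hq
        obtain ⟨p, hpmem, hpq⟩ := List.mem_map.1 hq
        rw [← hpq]
        exact (hLmem p hpmem).2
    rw [← list_sum_toNat L hLnn, hperm.sum_eq, add_zero]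
  · have hr2 : 2 ≤ r := by
      have := hrprime.two_le
      omega
    simp only [zero_add]
    rw [if_pos (by omega)]
    have hnn' : ∀ p ∈ L ++ [r], 0 ≤ p := by
      intro p hp
      rcases List.mem_append.1 hp with h | h
      · exact hLnn p h
      · simp at h; omega
    have hperm : ((L ++ [r]).map Int.toNat).Perm n.toNat.primeFactorsList := by
      apply Nat.primeFactorsList_unique
      · have := list_prod_toNat (L ++ [r]) hnn'
        rw [List.prod_append] at this
        simp only [List.prod_cons, List.prod_nil, mul_one] at this
        rw [hLprod] at this
        omega
      · intro q hq
        obtain ⟨p, hpmem, hpq⟩ := List.mem_map.1 hq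
        rcases List.mem_append.1 hpmem with h | h
        · rw [← hpq]; exact (hLmem p h).2
        · simp at h; subst h; rw [← hpq]; exact hrprime
    have := list_sum_toNat (L ++ [r]) hnn'
    rw [hperm.sum_eq] at this
    rw [this]
    simp

-- ---- the shared smith condition ----
theorem cond_eq (m : Int) (hm : 2 ≤ m) :
    (digital_root m = digital_root ((prime_factors m).sum)) ↔ is_smith_alt m = true := by
  unfold is_smith_alt
  rw [prime_eq]
  rcases Bool.eq_false_or_eq_true (prime m) with hp | hp
  · rw [hp, A_factors_prime m hm hp]
    simp only [List.sum_nil]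
    have hdz : digital_root 0 = 0 := by decide
    rw [hdz, dr_closed m (by omega)]
    have hpos := dralt_pos m (by omega)
    simp
    omega
  · rw [hp, A_sum_eq m hm hp, B_sum_eq m hm, dr_closed m (by omega),
      dr_closed _ (Int.natCast_nonneg _)]
    simp

-- ===== VERDICT (by name: the statement is the Claim_ definition above) =====
theorem smith_type_spec : Claim_equal_smith_type := by
  intro number _
  unfold Spec_smith_type
  by_cases h1 : number = 1
  · subst h1; decide
  · unfold smith_type smith_type_alt
    rw [prime_eq]
    rcases Bool.eq_false_or_eq_true (prime number) with hp | hp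
    · rw [hp]; simp
    · rw [hp]
      have h2 : 2 ≤ number := by
        by_contra hlt
        have hx := primeA_lt_two number (by omega)
        rw [hx] at hp
        simp at hp
        exact h1 hp
      have h4 : 4 ≤ number := by
        by_contra hlt
        have h23 : number = 2 ∨ number = 3 := by omega
        rcases h23 with h | h <;> subst h
        · exact absurd hp (by decide)
        · exact absurd hp (by decide)
      have e0 := cond_eq number h2
      have e1 := cond_eq (number - 1) (by omega)
      have e2 := cond_eq (number + 1) (by omega)
      simp only [List.map_id', Bool.false_eq_true, if_false, beq_iff_eq, Bool.not_eq_true']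
      by_cases c0 : digital_root number = digital_root (prime_factors number).sum
      · rw [if_pos c0, if_neg (show ¬ (is_smith_alt number = false) by simp [e0.1 c0])]
        by_cases c1 : digital_root (number - 1) =
            digital_root (prime_factors (number - 1)).sum
        · rw [if_pos c1, if_pos (e1.1 c1)]
        · rw [if_neg c1, if_neg (fun h => c1 (e1.2 h))]
          by_cases c2 : digital_root (number + 1) =
              digital_root (prime_factors (number + 1)).sum
          · rw [if_pos c2, if_pos (e2.1 c2)]
          · rw [if_neg c2, if_neg (fun h => c2 (e2.2 h))]
      · rw [if_neg c0]
        have hs0 : is_smith_alt number = false := by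
          rcases Bool.eq_false_or_eq_true (is_smith_alt number) with h | h
          · exact absurd (e0.2 h) c0
          · exact h
        rw [if_pos hs0]
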